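-- pv_equiv track=rewrite | github.com/heraldicsandfox/Lexikonok | scripts/parse.py | markov
-- ===== SOURCE A (Python) =====
-- def markov(text):
-- 	prob = {}
-- 	for s in text:
-- 		last = None
-- 		for w in s:
-- 			w = w.lower()
-- 			if last not in prob:
-- 				prob[last] = {}
-- 			prob[last][w] = 1 + prob[last].get(w,0)
-- 			last = w
-- 	return prob
-- ===== SOURCE B (Python) =====
-- from collections import Counter
--
-- def markov(text):
--     pairs = []
--     for s in text:
--         lowered = [w.lower() for w in s]
--         pairs.extend(zip([None] + lowered, lowered))
--     counts = Counter(pairs)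
--     prob = {}
--     for (prev, cur), n in counts.items():
--         prob.setdefault(prev, {})[cur] = n
--     return prob
-- ===== Notes on version B (the rewrite author's own statement) =====
-- stated objective: idiomatic
-- what changed: B replaces A's single loop that threads a `last` pointer and mutates nested dicts per word by a three-stage pipeline: generate all (prev, cur) transition pairs with zip over a None-prefixed lowered list, tally them in one collections.Counter, then assemble the plain dict-of-dicts from the counter's items.
import Mathlib
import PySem

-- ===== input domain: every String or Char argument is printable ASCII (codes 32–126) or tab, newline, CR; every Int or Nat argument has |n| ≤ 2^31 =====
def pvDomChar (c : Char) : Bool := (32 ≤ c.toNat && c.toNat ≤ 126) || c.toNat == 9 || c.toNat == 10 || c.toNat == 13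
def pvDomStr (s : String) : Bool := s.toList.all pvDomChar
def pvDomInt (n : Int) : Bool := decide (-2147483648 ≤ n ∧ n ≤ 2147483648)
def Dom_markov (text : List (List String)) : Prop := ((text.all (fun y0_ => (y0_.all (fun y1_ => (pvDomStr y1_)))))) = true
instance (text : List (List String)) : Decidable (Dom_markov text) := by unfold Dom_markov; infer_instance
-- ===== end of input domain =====

-- B replaces A's single loop threading a `last` pointer by an explicit pipeline: generate all
-- (prev, cur) transition pairs, tally them with collections.Counter, then assemble the dict-of-dicts.

-- ===== PORT A =====
def markov (text : List (List String)) : List (Option String × List (String × Int)) :=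
  let prob : PySem.Dict (Option String) (PySem.Dict String Int) :=
    text.foldl (fun prob s =>
      (s.foldl (fun (st : PySem.Dict (Option String) (PySem.Dict String Int) × Option String) w0 =>
          let w := PySem.Str.lower w0
          -- if last not in prob: prob[last] = {}
          let prob1 := if st.1.contains st.2 then st.1 else st.1.insert st.2 PySem.Dict.empty
          -- prob[last][w] = 1 + prob[last].get(w, 0)
          let inner := prob1.getD st.2 PySem.Dict.empty
          (prob1.insert st.2 (inner.insert w (1 + inner.getD w 0)), some w))
        (prob, none)).1)
      PySem.Dict.empty
  prob.items.map (fun kv => (kv.1, kv.2.items))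

-- ===== PORT B =====
def markov_alt (text : List (List String)) : List (Option String × List (String × Int)) :=
  let pairs : List (Option String × String) :=
    text.foldl (fun pairs s =>
      let lowered := s.map (fun w => PySem.Str.lower w)
      pairs ++ (none :: lowered.map some).zip lowered) []
  let counts : PySem.Dict (Option String × String) Int := PySem.Dict.counter pairs
  let prob : PySem.Dict (Option String) (PySem.Dict String Int) :=
    counts.items.foldl (fun prob e =>
      -- prob.setdefault(prev, {})[cur] = n
      let prob1 := prob.setdefault e.1.1 PySem.Dict.empty
      prob1.insert e.1.1 ((prob1.getD e.1.1 PySem.Dict.empty).insert e.1.2 e.2))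
      PySem.Dict.empty
  prob.items.map (fun kv => (kv.1, kv.2.items))

-- ===== PRECONDITION & SPEC =====
def Spec_markov (text : List (List String)) (out : List (Option String × List (String × Int))) : Prop := out = markov_alt text
instance (text : List (List String)) (out : List (Option String × List (String × Int))) : Decidable (Spec_markov text out) := by unfold Spec_markov; infer_instance

-- ===== CLAIM (what is proved, stated in full; the proofs are below) =====
def Claim_equal_markov : Prop := ∀ (text : List (List String)), Dom_markov text → Spec_markov text (markov text)


-- ===== LEMMAS AND PROOFS =====

-- Proof-side canonical forms: the state update both ports perform, and the closed-form
-- grouped dictionary both of them build.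

/-- The net effect of A's loop body on the outer dict, with the `if last not in prob`
    guard absorbed into a single insert. -/
def pvStep {a b : Type} [BEq a] [LawfulBEq a] [BEq b] [LawfulBEq b]
    (d : PySem.Dict a (PySem.Dict b Int)) (q : a × b) : PySem.Dict a (PySem.Dict b Int) :=
  d.insert q.1 ((d.getD q.1 PySem.Dict.empty).insert q.2 (1 + (d.getD q.1 PySem.Dict.empty).getD q.2 0))

/-- The net effect of B's assembly body, with `setdefault` absorbed. -/
def pvGStep {a b : Type} [BEq a] [LawfulBEq a] [BEq b] [LawfulBEq b]
    (d : PySem.Dict a (PySem.Dict b Int)) (e : (a × b) × Int) : PySem.Dict a (PySem.Dict b Int) :=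
  d.insert e.1.1 ((d.getD e.1.1 PySem.Dict.empty).insert e.1.2 e.2)

/-- Closed form of the inner dict at key `p` after processing the pair list `ps`. -/
def pvInner {a b : Type} [BEq a] [LawfulBEq a] [BEq b] [LawfulBEq b]
    (ps : List (a × b)) (p : a) : PySem.Dict b Int :=
  PySem.Dict.mk ((PySem.List.dedup ((ps.filter (fun e => e.1 == p)).map (fun e => e.2))).map
    (fun c => (c, (List.count (p, c) ps : Int))))

/-- Closed form of the outer dict after processing the pair list `ps`. -/
def pvCf {a b : Type} [BEq a] [LawfulBEq a] [BEq b] [LawfulBEq b]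
    (ps : List (a × b)) : PySem.Dict a (PySem.Dict b Int) :=
  PySem.Dict.mk ((PySem.List.dedup (ps.map (fun e => e.1))).map (fun p => (p, pvInner ps p)))

/-- Closed form of B's assembly fold over an arbitrary tally list `L` with distinct keys. -/
def pvGrouped {a b : Type} [BEq a] [LawfulBEq a] [BEq b] [LawfulBEq b]
    (L : List ((a × b) × Int)) : PySem.Dict a (PySem.Dict b Int) :=
  PySem.Dict.mk ((PySem.List.dedup (L.map (fun e => e.1.1))).map
    (fun p => (p, PySem.Dict.mk ((L.filter (fun e => e.1.1 == p)).map (fun e => (e.1.2, e.2))))))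

/-- The `prev`-`cur` transition pairs of the whole input, as B generates them. -/
def pvPairs (text : List (List String)) : List (Option String × String) :=
  text.flatMap (fun s =>
    (none :: (s.map (fun w => PySem.Str.lower w)).map some).zip (s.map (fun w => PySem.Str.lower w)))

theorem pv_dedup_append {a : Type} [BEq a] [LawfulBEq a] (l : List a) (x : a) :
    PySem.List.dedup (l ++ [x]) =
      if x ∈ l then PySem.List.dedup l else PySem.List.dedup l ++ [x] := by
  rw [PySem.List.dedup_eq_ofList, PySem.List.dedup_eq_ofList, PySem.Set.ofList_append_singleton,
    PySem.Set.add_eq_ite]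
  simp [PySem.Set.mem_ofList]

theorem pvStep_eq {a b : Type} [BEq a] [LawfulBEq a] [BEq b] [LawfulBEq b]
    (d : PySem.Dict a (PySem.Dict b Int)) (k : a) (c : b) :
    (let d1 := if d.contains k then d else d.insert k PySem.Dict.empty
     let inner := d1.getD k PySem.Dict.empty
     d1.insert k (inner.insert c (1 + inner.getD c 0))) = pvStep d (k, c) := by
  by_cases h : d.contains k = true
  · simp only [pvStep, h, if_true]
  · have h' : d.contains k = false := by simpa using h
    simp only [pvStep, h', Bool.false_eq_true, if_false]
    rw [PySem.Dict.getD_insert_self, PySem.Dict.insert_insert_self,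
      PySem.Dict.getD_of_not_contains d _ h']

theorem pvGStep_eq {a b : Type} [BEq a] [LawfulBEq a] [BEq b] [LawfulBEq b]
    (d : PySem.Dict a (PySem.Dict b Int)) (e : (a × b) × Int) :
    (let d1 := d.setdefault e.1.1 PySem.Dict.empty
     d1.insert e.1.1 ((d1.getD e.1.1 PySem.Dict.empty).insert e.1.2 e.2)) = pvGStep d e := by
  by_cases h : d.contains e.1.1 = true
  · simp only [pvGStep, PySem.Dict.setdefault_of_contains d _ h]
  · have h' : d.contains e.1.1 = false := by simpa using h
    simp only [pvGStep, PySem.Dict.setdefault_of_not_contains d _ h']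
    rw [PySem.Dict.getD_insert_self, PySem.Dict.insert_insert_self,
      PySem.Dict.getD_of_not_contains d _ h']

theorem pv_keys_pvCf {a b : Type} [BEq a] [LawfulBEq a] [BEq b] [LawfulBEq b]
    (ps : List (a × b)) :
    (pvCf ps).keys = PySem.List.dedup (ps.map (fun e => e.1)) := by
  simp only [pvCf, PySem.Dict.keys, List.map_map, PySem.List.dedup_eq_ofList]
  exact List.map_id'' (fun x => rfl) _

theorem pv_mem_filter_snd {a b : Type} [BEq a] [LawfulBEq a] [BEq b] [LawfulBEq b]
    (ps : List (a × b)) (p : a) (c : b) :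
    c ∈ (ps.filter (fun e => e.1 == p)).map (fun e => e.2) ↔ (p, c) ∈ ps := by
  constructor
  · intro h
    obtain ⟨e, he, hc⟩ := List.mem_map.mp h
    obtain ⟨hmem, hp⟩ := List.mem_filter.mp he
    have : e = (p, c) := by
      cases e; simp_all
    exact this ▸ hmem
  · intro h
    exact List.mem_map.mpr ⟨(p, c), List.mem_filter.mpr ⟨h, by simp⟩, rfl⟩

theorem pv_keys_pvInner {a b : Type} [BEq a] [LawfulBEq a] [BEq b] [LawfulBEq b]
    (ps : List (a × b)) (p : a) :
    (pvInner ps p).keys = PySem.List.dedup ((ps.filter (fun e => e.1 == p)).map (fun e => e.2)) := by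
  simp only [pvInner, PySem.Dict.keys, List.map_map]
  exact List.map_id'' (fun x => rfl) _

theorem pv_getD_pvInner_mem {a b : Type} [BEq a] [LawfulBEq a] [BEq b] [LawfulBEq b]
    (ps : List (a × b)) (p : a) (c : b) (h : (p, c) ∈ ps) (d0 : Int) :
    (pvInner ps p).getD c d0 = (List.count (p, c) ps : Int) := by
  have hkeys : (pvInner ps p).keys.Nodup := by
    rw [pv_keys_pvInner, PySem.List.dedup_eq_ofList]; exact PySem.Set.nodup_ofList _
  have hmem : (c, (List.count (p, c) ps : Int)) ∈ (pvInner ps p).items := by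
    unfold pvInner
    exact List.mem_map_of_mem (by
      rw [PySem.List.dedup_eq_ofList, PySem.Set.mem_ofList]
      exact (pv_mem_filter_snd ps p c).mpr h)
  exact PySem.Dict.getD_of_mem_items _ hmem hkeys d0

theorem pv_contains_pvInner {a b : Type} [BEq a] [LawfulBEq a] [BEq b] [LawfulBEq b] [DecidableEq b]
    (ps : List (a × b)) (p : a) (c : b) :
    (pvInner ps p).contains c = decide ((p, c) ∈ ps) := by
  rw [PySem.Dict.contains_eq_decide_mem_keys, pv_keys_pvInner]
  simp [PySem.List.dedup_eq_ofList, PySem.Set.mem_ofList, pv_mem_filter_snd ps p c]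

theorem pv_inner_unchanged {a b : Type} [BEq a] [LawfulBEq a] [BEq b] [LawfulBEq b]
    (ps : List (a × b)) (q : a × b) (p : a) (h : p ≠ q.1) :
    pvInner (ps ++ [q]) p = pvInner ps p := by
  have hq : (q.1 == p) = false := by simp [Ne.symm h]
  have hfil : (ps ++ [q]).filter (fun e => e.1 == p) = ps.filter (fun e => e.1 == p) := by
    simp [List.filter_append, hq]
  unfold pvInner
  rw [hfil]
  congr 1
  apply List.map_congr_left
  intro c _
  have hne : q ≠ (p, c) := by
    intro he; rw [he] at hq; simp at hq
  simp [List.count_append, hne]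

theorem pv_inner_step {a b : Type} [BEq a] [LawfulBEq a] [BEq b] [LawfulBEq b] [DecidableEq b]
    (ps : List (a × b)) (q : a × b) :
    (pvInner ps q.1).insert q.2 (1 + (pvInner ps q.1).getD q.2 0) = pvInner (ps ++ [q]) q.1 := by
  obtain ⟨p0, c0⟩ := q
  have hfil : (ps ++ [(p0, c0)]).filter (fun e => e.1 == p0)
      = ps.filter (fun e => e.1 == p0) ++ [(p0, c0)] := by
    simp [List.filter_append]
  by_cases hc : (p0, c0) ∈ ps
  · have hcont : (pvInner ps p0).contains c0 = true := by
      rw [pv_contains_pvInner]; simpa using hc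
    rw [pv_getD_pvInner_mem ps p0 c0 hc]
    apply PySem.Dict.ext
    rw [PySem.Dict.items_insert_of_contains _ _ hcont]
    show ((PySem.List.dedup _).map _).map _ = _
    unfold pvInner
    rw [hfil, List.map_append]
    simp only [List.map_cons, List.map_nil]
    rw [pv_dedup_append, if_pos ((pv_mem_filter_snd ps p0 c0).mpr hc), List.map_map]
    apply List.map_congr_left
    intro c _
    by_cases hcc : c = c0
    · subst hcc
      have : List.count (p0, c) (ps ++ [(p0, c)]) = List.count (p0, c) ps + 1 := by
        simp [List.count_append]
      simp only [Function.comp, beq_self_eq_true, if_pos, this]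
      push_cast
      ring_nf
    · have hne : (p0, c0) ≠ (p0, c) := fun he => hcc (congrArg Prod.snd he).symm
      simp [Function.comp, hcc, List.count_append, hne]
  · have hcont : (pvInner ps p0).contains c0 = false := by
      rw [pv_contains_pvInner]; simpa using hc
    rw [PySem.Dict.getD_of_not_contains _ _ hcont]
    apply PySem.Dict.ext
    rw [PySem.Dict.items_insert_of_not_contains _ _ hcont]
    show (PySem.List.dedup _).map _ ++ _ = _
    unfold pvInner
    rw [hfil, List.map_append]
    simp only [List.map_cons, List.map_nil]
    rw [pv_dedup_append, if_neg (fun hm => hc ((pv_mem_filter_snd ps p0 c0).mp hm)),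
      List.map_append]
    congr 1
    · apply List.map_congr_left
      intro c hcmem
      have hcc : c ≠ c0 := by
        intro he; subst he
        exact hc ((pv_mem_filter_snd ps p0 c).mp
          (by rwa [PySem.List.dedup_eq_ofList, PySem.Set.mem_ofList] at hcmem))
      have hne : (p0, c0) ≠ (p0, c) := fun he => hcc (congrArg Prod.snd he).symm
      simp [List.count_append, hne]
    · have : List.count (p0, c0) ps = 0 := List.count_eq_zero.mpr hc
      simp [List.count_append, this]

theorem pv_inner_empty {a b : Type} [BEq a] [LawfulBEq a] [BEq b] [LawfulBEq b]
    (ps : List (a × b)) (p : a) (h : p ∉ ps.map (fun e => e.1)) :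
    pvInner ps p = PySem.Dict.empty := by
  have hfil : ps.filter (fun e => e.1 == p) = [] := by
    rw [List.filter_eq_nil_iff]
    intro e he hb
    exact h (List.mem_map.mpr ⟨e, he, by simpa using hb⟩)
  unfold pvInner
  rw [hfil]
  rfl

theorem pv_getD_pvCf_mem {a b : Type} [BEq a] [LawfulBEq a] [BEq b] [LawfulBEq b]
    (ps : List (a × b)) (p : a) (h : p ∈ ps.map (fun e => e.1)) (d0 : PySem.Dict b Int) :
    (pvCf ps).getD p d0 = pvInner ps p := by
  have hkeys : (pvCf ps).keys.Nodup := by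
    rw [pv_keys_pvCf, PySem.List.dedup_eq_ofList]; exact PySem.Set.nodup_ofList _
  have hmem : (p, pvInner ps p) ∈ (pvCf ps).items := by
    unfold pvCf
    exact List.mem_map_of_mem (by rw [PySem.List.dedup_eq_ofList, PySem.Set.mem_ofList]; exact h)
  exact PySem.Dict.getD_of_mem_items _ hmem hkeys d0

theorem pv_contains_pvCf {a b : Type} [BEq a] [LawfulBEq a] [DecidableEq a] [BEq b] [LawfulBEq b]
    (ps : List (a × b)) (p : a) :
    (pvCf ps).contains p = decide (p ∈ ps.map (fun e => e.1)) := by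
  rw [PySem.Dict.contains_eq_decide_mem_keys, pv_keys_pvCf]
  simp [PySem.List.dedup_eq_ofList, PySem.Set.mem_ofList]

theorem pv_cf_step {a b : Type} [BEq a] [LawfulBEq a] [DecidableEq a] [BEq b] [LawfulBEq b] [DecidableEq b]
    (ps : List (a × b)) (q : a × b) :
    pvStep (pvCf ps) q = pvCf (ps ++ [q]) := by
  obtain ⟨p0, c0⟩ := q
  by_cases hp : p0 ∈ ps.map (fun e => e.1)
  · have hcont : (pvCf ps).contains p0 = true := by
      rw [pv_contains_pvCf]; simpa using hp
    show (pvCf ps).insert p0 _ = _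
    rw [pv_getD_pvCf_mem ps p0 hp, pv_inner_step ps (p0, c0)]
    apply PySem.Dict.ext
    rw [PySem.Dict.items_insert_of_contains _ _ hcont]
    show ((PySem.List.dedup _).map _).map _ = _
    unfold pvCf
    rw [List.map_append]
    simp only [List.map_cons, List.map_nil]
    rw [pv_dedup_append, if_pos hp, List.map_map]
    apply List.map_congr_left
    intro p _
    by_cases hpp : p = p0
    · subst hpp; simp [Function.comp]
    · simp [Function.comp, hpp, pv_inner_unchanged ps (p0, c0) p hpp]
  · have hcont : (pvCf ps).contains p0 = false := by
      rw [pv_contains_pvCf]; simpa using hp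
    show (pvCf ps).insert p0 _ = _
    rw [PySem.Dict.getD_of_not_contains _ _ hcont, ← pv_inner_empty ps p0 hp,
      pv_inner_step ps (p0, c0)]
    apply PySem.Dict.ext
    rw [PySem.Dict.items_insert_of_not_contains _ _ hcont]
    show (PySem.List.dedup _).map _ ++ _ = _
    unfold pvCf
    rw [List.map_append]
    simp only [List.map_cons, List.map_nil]
    rw [pv_dedup_append, if_neg hp, List.map_append]
    congr 1
    apply List.map_congr_left
    intro p hpmem
    have hpp : p ≠ p0 := by
      intro he; subst he
      exact hp (by rwa [PySem.List.dedup_eq_ofList, PySem.Set.mem_ofList] at hpmem)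
    rw [pv_inner_unchanged ps (p0, c0) p hpp]

theorem pv_fold_cf {a b : Type} [BEq a] [LawfulBEq a] [DecidableEq a] [BEq b] [LawfulBEq b] [DecidableEq b]
    (ps : List (a × b)) :
    ps.foldl pvStep PySem.Dict.empty = pvCf ps := by
  induction ps using List.reverseRecOn with
  | nil => rfl
  | append_singleton ps q ih =>
    rw [List.foldl_append, List.foldl_cons, List.foldl_nil, ih, pv_cf_step]

theorem pv_keys_pvGrouped {a b : Type} [BEq a] [LawfulBEq a] [BEq b] [LawfulBEq b]
    (L : List ((a × b) × Int)) :
    (pvGrouped L).keys = PySem.List.dedup (L.map (fun e => e.1.1)) := by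
  simp only [pvGrouped, PySem.Dict.keys, List.map_map]
  exact List.map_id'' (fun x => rfl) _

theorem pv_contains_pvGrouped {a b : Type} [BEq a] [LawfulBEq a] [DecidableEq a] [BEq b] [LawfulBEq b]
    (L : List ((a × b) × Int)) (p : a) :
    (pvGrouped L).contains p = decide (p ∈ L.map (fun e => e.1.1)) := by
  rw [PySem.Dict.contains_eq_decide_mem_keys, pv_keys_pvGrouped]
  simp [PySem.List.dedup_eq_ofList, PySem.Set.mem_ofList]

theorem pv_getD_pvGrouped_mem {a b : Type} [BEq a] [LawfulBEq a] [BEq b] [LawfulBEq b]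
    (L : List ((a × b) × Int)) (p : a) (h : p ∈ L.map (fun e => e.1.1)) (d0 : PySem.Dict b Int) :
    (pvGrouped L).getD p d0
      = PySem.Dict.mk ((L.filter (fun e => e.1.1 == p)).map (fun e => (e.1.2, e.2))) := by
  have hkeys : (pvGrouped L).keys.Nodup := by
    rw [pv_keys_pvGrouped, PySem.List.dedup_eq_ofList]; exact PySem.Set.nodup_ofList _
  have hmem : (p, PySem.Dict.mk ((L.filter (fun e => e.1.1 == p)).map (fun e => (e.1.2, e.2))))
      ∈ (pvGrouped L).items := by
    unfold pvGrouped
    exact List.mem_map_of_mem (by rw [PySem.List.dedup_eq_ofList, PySem.Set.mem_ofList]; exact h)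
  exact PySem.Dict.getD_of_mem_items _ hmem hkeys d0

theorem pv_grouped_step {a b : Type} [BEq a] [LawfulBEq a] [DecidableEq a] [BEq b] [LawfulBEq b] [DecidableEq b]
    (L : List ((a × b) × Int)) (e : (a × b) × Int) (he : e.1 ∉ L.map (fun x => x.1)) :
    pvGStep (pvGrouped L) e = pvGrouped (L ++ [e]) := by
  obtain ⟨⟨p0, c0⟩, n⟩ := e
  simp only at he
  have hfilne : ∀ p, p ≠ p0 → (L ++ [((p0, c0), n)]).filter (fun x => x.1.1 == p)
      = L.filter (fun x => x.1.1 == p) := by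
    intro p hne
    simp [List.filter_append, Ne.symm hne]
  have hfileq : (L ++ [((p0, c0), n)]).filter (fun x => x.1.1 == p0)
      = L.filter (fun x => x.1.1 == p0) ++ [((p0, c0), n)] := by
    simp [List.filter_append]
  by_cases hp : p0 ∈ L.map (fun e => e.1.1)
  · have hcont : (pvGrouped L).contains p0 = true := by
      rw [pv_contains_pvGrouped]; simpa using hp
    show (pvGrouped L).insert p0 _ = _
    rw [pv_getD_pvGrouped_mem L p0 hp]
    have hcin : (PySem.Dict.mk ((L.filter (fun e => e.1.1 == p0)).map
        (fun e => (e.1.2, e.2)))).contains c0 = false := by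
      rw [PySem.Dict.contains_eq_decide_mem_keys]
      simp only [PySem.Dict.keys, List.map_map]
      apply decide_eq_false
      intro hm
      obtain ⟨x, hx, hx2⟩ := List.mem_map.mp hm
      obtain ⟨hxL, hx1⟩ := List.mem_filter.mp hx
      exact he (List.mem_map.mpr ⟨x, hxL, by
        have : x.1.1 = p0 := by simpa using hx1
        cases hx2
        exact Prod.ext this rfl⟩)
    apply PySem.Dict.ext
    rw [PySem.Dict.items_insert_of_contains _ _ hcont]
    show ((PySem.List.dedup _).map _).map _ = _
    unfold pvGrouped
    rw [List.map_append]
    simp only [List.map_cons, List.map_nil]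
    rw [pv_dedup_append, if_pos hp, List.map_map]
    apply List.map_congr_left
    intro p _
    by_cases hpp : p = p0
    · subst hpp
      simp only [Function.comp, beq_self_eq_true, if_pos]
      congr 1
      apply PySem.Dict.ext
      rw [PySem.Dict.items_insert_of_not_contains _ _ hcin, hfileq, List.map_append]
      rfl
    · simp only [Function.comp]
      rw [if_neg (by simpa using hpp), hfilne p hpp]
  · have hcont : (pvGrouped L).contains p0 = false := by
      rw [pv_contains_pvGrouped]; simpa using hp
    have hfil0 : L.filter (fun x => x.1.1 == p0) = [] := by
      rw [List.filter_eq_nil_iff]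
      intro x hx hb
      exact hp (List.mem_map.mpr ⟨x, hx, by simpa using hb⟩)
    show (pvGrouped L).insert p0 _ = _
    rw [PySem.Dict.getD_of_not_contains _ _ hcont]
    apply PySem.Dict.ext
    rw [PySem.Dict.items_insert_of_not_contains _ _ hcont]
    show (PySem.List.dedup _).map _ ++ _ = _
    unfold pvGrouped
    rw [List.map_append]
    simp only [List.map_cons, List.map_nil]
    rw [pv_dedup_append, if_neg hp, List.map_append]
    congr 1
    · apply List.map_congr_left
      intro p hpmem
      have hpp : p ≠ p0 := by
        intro hep; subst hep
        exact hp (by rwa [PySem.List.dedup_eq_ofList, PySem.Set.mem_ofList] at hpmem)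
      rw [hfilne p hpp]
    · simp only [List.map_cons, List.map_nil]
      rw [hfileq, hfil0]
      simp only [List.nil_append, List.map_cons, List.map_nil]
      congr 2

theorem pv_fold_grouped {a b : Type} [BEq a] [LawfulBEq a] [DecidableEq a] [BEq b] [LawfulBEq b] [DecidableEq b]
    (L : List ((a × b) × Int)) (h : (L.map (fun x => x.1)).Nodup) :
    L.foldl pvGStep PySem.Dict.empty = pvGrouped L := by
  induction L using List.reverseRecOn with
  | nil => rfl
  | append_singleton L e ih =>
    rw [List.map_append] at h
    simp only [List.map_cons, List.map_nil] at h
    rw [List.nodup_append] at h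
    obtain ⟨h1, _, hd⟩ := h
    have he : e.1 ∉ L.map (fun x => x.1) := by
      intro hm
      exact hd e.1 hm e.1 (by simp) rfl
    rw [List.foldl_append, List.foldl_cons, List.foldl_nil, ih h1, pv_grouped_step L e he]

theorem pv_ofList_map_ofList {a b : Type} [BEq a] [LawfulBEq a] [BEq b] [LawfulBEq b]
    (xs : List a) (f : a → b) :
    PySem.Set.ofList ((PySem.Set.ofList xs).map f) = PySem.Set.ofList (xs.map f) := by
  induction xs using List.reverseRecOn with
  | nil => rfl
  | append_singleton xs x ih =>
    rw [PySem.Set.ofList_append_singleton, PySem.Set.add_eq_ite, List.map_append]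
    simp only [List.map_cons, List.map_nil]
    rw [PySem.Set.ofList_append_singleton, PySem.Set.add_eq_ite]
    by_cases hx : x ∈ PySem.Set.ofList xs
    · rw [if_pos hx, ih, if_pos]
      rw [PySem.Set.mem_ofList]
      exact List.mem_map_of_mem (by rwa [PySem.Set.mem_ofList] at hx)
    · rw [if_neg hx, List.map_append]
      simp only [List.map_cons, List.map_nil]
      rw [PySem.Set.ofList_append_singleton, PySem.Set.add_eq_ite, ih]

theorem pv_filter_ofList {a : Type} [BEq a] [LawfulBEq a] (xs : List a) (g : a → Bool) :
    (PySem.Set.ofList xs).filter g = PySem.Set.ofList (xs.filter g) := by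
  induction xs using List.reverseRecOn with
  | nil => rfl
  | append_singleton xs x ih =>
    rw [PySem.Set.ofList_append_singleton, PySem.Set.add_eq_ite, List.filter_append]
    by_cases hg : g x
    · simp only [List.filter_cons, hg, if_pos, List.filter_nil]
      rw [PySem.Set.ofList_append_singleton, PySem.Set.add_eq_ite, ← ih]
      by_cases hx : x ∈ PySem.Set.ofList xs
      · rw [if_pos hx, if_pos]
        rw [List.mem_filter]
        exact ⟨hx, hg⟩
      · rw [if_neg hx, List.filter_append]
        simp only [List.filter_cons, hg, if_pos, List.filter_nil]
        rw [if_neg (fun hm => hx (List.mem_filter.mp hm).1)]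
    · have hg' : g x = false := by simpa using hg
      simp only [List.filter_cons, hg', Bool.false_eq_true, if_false, List.filter_nil,
        List.append_nil]
      rw [← ih]
      by_cases hx : x ∈ PySem.Set.ofList xs
      · rw [if_pos hx]
      · rw [if_neg hx, List.filter_append]
        simp [hg']

theorem pv_map_snd_ofList {a b : Type} [BEq a] [LawfulBEq a] [BEq b] [LawfulBEq b]
    (xs : List (a × b)) (p : a) (h : ∀ e ∈ xs, e.1 = p) :
    (PySem.Set.ofList xs).map (fun e => e.2) = PySem.Set.ofList (xs.map (fun e => e.2)) := by
  induction xs using List.reverseRecOn with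
  | nil => rfl
  | append_singleton xs x ih =>
    have hx1 : x.1 = p := h x (by simp)
    have ih' := ih (fun e he => h e (List.mem_append_left _ he))
    rw [PySem.Set.ofList_append_singleton, PySem.Set.add_eq_ite, List.map_append]
    simp only [List.map_cons, List.map_nil]
    rw [PySem.Set.ofList_append_singleton, PySem.Set.add_eq_ite, ← ih']
    by_cases hx : x ∈ PySem.Set.ofList xs
    · rw [if_pos hx, if_pos]
      exact List.mem_map_of_mem hx
    · rw [if_neg hx, List.map_append]
      simp only [List.map_cons, List.map_nil]
      rw [if_neg]
      intro hm
      obtain ⟨e, he, he2⟩ := List.mem_map.mp hm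
      have : e = x := by
        have h1 : e.1 = p := h e (List.mem_append_left _ (by rwa [PySem.Set.mem_ofList] at he))
        exact Prod.ext (h1.trans hx1.symm) he2
      exact hx (this ▸ he)

theorem pv_grouped_counter {a b : Type} [BEq a] [LawfulBEq a] [DecidableEq a] [BEq b] [LawfulBEq b] [DecidableEq b]
    (ps : List (a × b)) :
    pvGrouped ((PySem.Dict.counter ps).items) = pvCf ps := by
  apply PySem.Dict.ext
  unfold pvGrouped pvCf
  show List.map _ _ = List.map _ _
  rw [PySem.Dict.items_counter, List.map_map]
  have houter : PySem.List.dedup (List.map ((fun e => e.1.1) ∘ fun k => (k, (List.count k ps : Int)))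
      (PySem.Set.ofList ps)) = PySem.List.dedup (ps.map (fun e => e.1)) := by
    rw [PySem.List.dedup_eq_ofList, PySem.List.dedup_eq_ofList]
    exact pv_ofList_map_ofList ps (fun e => e.1)
  rw [houter]
  apply List.map_congr_left
  intro p _
  congr 1
  unfold pvInner
  apply PySem.Dict.ext
  show ((List.map _ _).filter _).map _ = _
  rw [List.filter_map, List.map_map]
  show ((PySem.Set.ofList ps).filter (fun k => k.1 == p)).map
      (fun k => (k.2, (List.count k ps : Int))) = _
  rw [pv_filter_ofList]
  have hcg : ∀ k ∈ PySem.Set.ofList (ps.filter (fun e => e.1 == p)),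
      (fun k => (k.2, (List.count k ps : Int))) k
        = ((fun c => (c, (List.count (p, c) ps : Int))) ∘ (fun e : a × b => e.2)) k := by
    intro k hk
    have hk1 : k.1 = p := by
      rw [PySem.Set.mem_ofList] at hk
      have := (List.mem_filter.mp hk).2
      simpa using this
    obtain ⟨k1, k2⟩ := k
    simp only at hk1
    subst hk1
    rfl
  rw [List.map_congr_left hcg, ← List.map_map,
    pv_map_snd_ofList _ p (fun e he => by simpa using (List.mem_filter.mp he).2),
    PySem.List.dedup_eq_ofList]

theorem pv_innerA (s : List String)
    (prob : PySem.Dict (Option String) (PySem.Dict String Int)) (last : Option String) :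
    (s.foldl (fun (st : PySem.Dict (Option String) (PySem.Dict String Int) × Option String) w0 =>
          (pvStep st.1 (st.2, PySem.Str.lower w0), some (PySem.Str.lower w0))) (prob, last)).1 =
      ((last :: (s.map (fun w => PySem.Str.lower w)).map some).zip
        (s.map (fun w => PySem.Str.lower w))).foldl pvStep prob := by
  induction s generalizing prob last with
  | nil => rfl
  | cons w t ih =>
    simp only [List.foldl_cons, List.map_cons, List.zip_cons_cons]
    exact ih (pvStep prob (last, PySem.Str.lower w)) (some (PySem.Str.lower w))

theorem pv_outerA (text : List (List String))
    (d : PySem.Dict (Option String) (PySem.Dict String Int)) :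
    text.foldl (fun prob s =>
        (s.foldl (fun (st : PySem.Dict (Option String) (PySem.Dict String Int) × Option String) w0 =>
            (pvStep st.1 (st.2, PySem.Str.lower w0), some (PySem.Str.lower w0))) (prob, none)).1) d
      = (pvPairs text).foldl pvStep d := by
  induction text generalizing d with
  | nil => rfl
  | cons s t ih =>
    simp only [List.foldl_cons]
    rw [pv_innerA, ih]
    conv_rhs => rw [pvPairs, List.flatMap_cons, List.foldl_append]
    rfl

theorem pv_markov_eq (text : List (List String)) :
    markov text = (pvCf (pvPairs text)).items.map (fun kv => (kv.1, kv.2.items)) := by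
  have hf : (fun (st : PySem.Dict (Option String) (PySem.Dict String Int) × Option String) w0 =>
        let w := PySem.Str.lower w0
        let prob1 := if st.1.contains st.2 then st.1 else st.1.insert st.2 PySem.Dict.empty
        let inner := prob1.getD st.2 PySem.Dict.empty
        (prob1.insert st.2 (inner.insert w (1 + inner.getD w 0)), some w))
      = (fun (st : PySem.Dict (Option String) (PySem.Dict String Int) × Option String) w0 =>
        (pvStep st.1 (st.2, PySem.Str.lower w0), some (PySem.Str.lower w0))) :=
    funext fun st => funext fun w0 =>
      congrArg (fun d => (d, some (PySem.Str.lower w0))) (pvStep_eq st.1 st.2 (PySem.Str.lower w0))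
  show ((text.foldl _ PySem.Dict.empty).items.map _ : List _) = _
  rw [hf, pv_outerA, pv_fold_cf]

theorem pv_markov_alt_eq (text : List (List String)) :
    markov_alt text = (pvCf (pvPairs text)).items.map (fun kv => (kv.1, kv.2.items)) := by
  have hpairs : text.foldl (fun pairs s =>
        let lowered := s.map (fun w => PySem.Str.lower w)
        pairs ++ (none :: lowered.map some).zip lowered) [] = pvPairs text := by
    exact (PySem.List.foldl_append_eq_flatMap
      (fun s => (none :: (s.map (fun w => PySem.Str.lower w)).map some).zip
        (s.map (fun w => PySem.Str.lower w))) text []).trans (List.nil_append _)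
  have hf2 : (fun (prob : PySem.Dict (Option String) (PySem.Dict String Int)) e =>
        let prob1 := prob.setdefault e.1.1 PySem.Dict.empty
        prob1.insert e.1.1 ((prob1.getD e.1.1 PySem.Dict.empty).insert e.1.2 e.2))
      = (pvGStep (a := Option String) (b := String)) :=
    funext fun prob => funext fun e => pvGStep_eq prob e
  show ((PySem.Dict.counter (text.foldl (fun pairs s =>
      let lowered := s.map (fun w => PySem.Str.lower w)
      pairs ++ (none :: lowered.map some).zip lowered) [])).items.foldl
      (fun prob e =>
        let prob1 := prob.setdefault e.1.1 PySem.Dict.empty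
        prob1.insert e.1.1 ((prob1.getD e.1.1 PySem.Dict.empty).insert e.1.2 e.2))
      PySem.Dict.empty).items.map (fun kv => (kv.1, kv.2.items)) = _
  rw [hpairs, hf2, pv_fold_grouped _ (by exact PySem.Dict.nodup_keys_counter (pvPairs text)),
    pv_grouped_counter]

-- ===== VERDICT (by name: the statement is the Claim_ definition above) =====
theorem markov_spec : Claim_equal_markov := by
  intro text _
  unfold Spec_markov
  rw [pv_markov_eq, pv_markov_alt_eq]
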